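-- pv_equiv track=rewrite | github.com/iansedano/aoc | python/src/aoc/y_2025/d_02/solution.py | similar_segments
-- ===== SOURCE A (Python) =====
-- def similar_segments(id_str, seq_len):
--     """
--     >>> similar_segments("2121212121", 2)
--     True
--     """
--     length = len(id_str)
--
--     if length % seq_len != 0:
--         return False
--
--     number_of_segments = length // seq_len
--
--     segments = set()
--
--     for x in range(number_of_segments):
--         start = x * seq_len
--         end = start + seq_len
--
--         segments.add(id_str[start:end])
--         # try:
--         #     segments.add(id_str[start:end])
--         # except IndexError:
--         #     return False
--
--     if len(segments) == 1:
--         return True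
-- ===== SOURCE B (Python) =====
-- def similar_segments(id_str, seq_len):
--     if len(id_str) % seq_len != 0:
--         return False
--     number_of_segments = len(id_str) // seq_len
--     return number_of_segments >= 1 and id_str == id_str[:seq_len] * number_of_segments
-- ===== Notes on version B (the rewrite author's own statement) =====
-- stated objective: simpler
-- what changed: Replaces the loop that accumulates every segment into a set and then tests the set's cardinality with a single closed-form comparison of the whole string against its first seq_len characters repeated; Pre_ excludes seq_len = 0 (ZeroDivisionError) and the inputs where A falls off the end and returns None (length divisible by seq_len but the string is empty or not a repetition), since None is not a bool.
-- outside the precondition, e.g. on similar_segments('bbbaaa', 2): A returns None, B returns False; on similar_segments('', 1): A returns None, B returns False; on similar_segments('aaaa', -2): A returns None, B returns False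
import Mathlib
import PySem

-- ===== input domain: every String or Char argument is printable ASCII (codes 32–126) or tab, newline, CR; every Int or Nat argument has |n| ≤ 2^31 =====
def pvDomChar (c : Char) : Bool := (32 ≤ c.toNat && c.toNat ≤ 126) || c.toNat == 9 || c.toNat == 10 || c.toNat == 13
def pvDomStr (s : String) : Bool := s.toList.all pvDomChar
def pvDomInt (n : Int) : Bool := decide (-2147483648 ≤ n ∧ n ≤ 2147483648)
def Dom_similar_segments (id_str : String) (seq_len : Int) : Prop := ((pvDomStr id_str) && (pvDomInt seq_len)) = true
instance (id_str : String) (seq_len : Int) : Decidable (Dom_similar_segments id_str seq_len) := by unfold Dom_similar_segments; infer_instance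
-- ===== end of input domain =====

-- B replaces A's segment-set accumulation by one repeated-prefix comparison (simpler, same O(n) cost).

-- ===== PORT A =====
-- literal port of A; the fall-off-the-end `return None` (not a bool) is outside Pre_ below,
-- where this port returns false
def similar_segments (id_str : String) (seq_len : Int) : Bool :=
  let length : Int := PySem.Chars.len id_str.toList
  if PySem.Int.mod length seq_len ≠ 0 then false
  else
    let number_of_segments : Int := PySem.Int.floordiv length seq_len
    let segments : PySem.Set (List Char) :=
      (PySem.List.pyRange 0 number_of_segments 1).foldl
        (fun segments x =>
          let start := x * seq_len
          let stop := start + seq_len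
          PySem.Set.add segments (PySem.Chars.slice id_str.toList (some start) (some stop)))
        PySem.Set.empty
    if PySem.Set.len segments = 1 then true
    else false  -- Python: implicit None, excluded by Pre_

-- ===== PORT B =====
def similar_segments_alt (id_str : String) (seq_len : Int) : Bool :=
  let s := id_str.toList
  let length : Int := PySem.Chars.len s
  if PySem.Int.mod length seq_len ≠ 0 then false
  else
    let number_of_segments : Int := PySem.Int.floordiv length seq_len
    -- `id_str[:seq_len] * number_of_segments`: str * n is exact as flatten∘replicate for n ≥ 0,
    -- and the short-circuit `1 ≤ number_of_segments` guards the n < 0 case (Python gives '') too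
    decide (1 ≤ number_of_segments) &&
      (s == List.flatten (List.replicate number_of_segments.toNat
              (PySem.Chars.slice s none (some seq_len))))

-- ===== PRECONDITION & SPEC =====
-- Pre_ excludes seq_len = 0 (A raises ZeroDivisionError) and the inputs where A returns the
-- non-bool None (length divisible by seq_len but the string is empty or not a whole-number
-- repetition of its first seq_len characters).
def Pre_similar_segments (id_str : String) (seq_len : Int) : Prop :=
  seq_len ≠ 0 ∧
    (¬ (seq_len ∣ (id_str.toList.length : Int)) ∨
      (0 < seq_len ∧ id_str.toList ≠ [] ∧
        id_str.toList = List.flatten (List.replicate (id_str.toList.length / seq_len.toNat)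
          (id_str.toList.take seq_len.toNat))))
instance (id_str : String) (seq_len : Int) : Decidable (Pre_similar_segments id_str seq_len) := by
  unfold Pre_similar_segments; infer_instance

def pvWitness_similar_segments : String × Int := ("2121212121", 2)

def Spec_similar_segments (id_str : String) (seq_len : Int) (out : Bool) : Prop := out = similar_segments_alt id_str seq_len
instance (id_str : String) (seq_len : Int) (out : Bool) : Decidable (Spec_similar_segments id_str seq_len out) := by unfold Spec_similar_segments; infer_instance

-- ===== CLAIM (what is proved, stated in full; the proofs are below) =====
def Claim_equal_similar_segments : Prop := ∀ (id_str : String) (seq_len : Int), Dom_similar_segments id_str seq_len → Pre_similar_segments id_str seq_len → Spec_similar_segments id_str seq_len (similar_segments id_str seq_len)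

-- ===== LEMMAS AND PROOFS =====

-- a segment of a k-periodic list equals the period
lemma periodic_drop_take (t : List Char) (N j : ℕ) (hj : j < N) :
    ((List.flatten (List.replicate N t)).drop (j * t.length)).take t.length = t := by
  induction N generalizing j with
  | zero => omega
  | succ N ih =>
    rw [List.replicate_succ, List.flatten_cons]
    cases j with
    | zero =>
      simp
    | succ j =>
      have h : (j + 1) * t.length = t.length + j * t.length := by ring
      rw [h, List.drop_length_add_append]
      exact ih j (by omega)

-- folding `add (f x)` over a list whose image is constantly c, starting from {c}
lemma foldl_add_const {α : Type} [BEq α] [LawfulBEq α] (f : Int → α) (c : α)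
    (l : List Int) (h : ∀ x ∈ l, f x = c) :
    l.foldl (fun acc x => PySem.Set.add acc (f x)) [c] = [c] := by
  induction l with
  | nil => rfl
  | cons x l ih =>
    have hx : f x = c := h x (by simp)
    have : PySem.Set.add [c] (f x) = [c] := by
      simp [hx, PySem.Set.add, PySem.Set.contains]
    simp only [List.foldl_cons, this]
    exact ih (fun y hy => h y (by simp [hy]))

theorem similar_segments_spec : Claim_equal_similar_segments := by
  intro id_str seq_len _ hpre
  obtain ⟨hk0, hcase⟩ := hpre
  unfold Spec_similar_segments similar_segments similar_segments_alt
  simp only [PySem.Chars.len_eq]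
  set s := id_str.toList with hs
  rcases hcase with hndvd | ⟨hkpos, hne, hper⟩
  · -- not divisible: both take the first branch
    have hmod : PySem.Int.mod (s.length : Int) seq_len ≠ 0 := by
      rw [Ne, PySem.Int.mod_eq_zero_iff_dvd]; exact hndvd
    rw [if_pos hmod, if_pos hmod]
  · -- divisible and periodic: both return true
    set k : ℕ := seq_len.toNat with hkdef
    have hkcast : seq_len = (k : Int) := (Int.toNat_of_nonneg (le_of_lt hkpos)).symm
    have hkpos' : 0 < k := by omega
    set t : List Char := s.take k with ht
    set N : ℕ := s.length / k with hN
    have hper' : s = List.flatten (List.replicate N t) := hper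
    have hslen : s.length = N * t.length := by
      conv_lhs => rw [hper']
      simp [List.length_flatten, List.map_replicate]
    have hNpos : 0 < N := by
      rcases Nat.eq_zero_or_pos N with h0 | h
      · exfalso; apply hne; rw [hper', h0]; rfl
      · exact h
    have htlen : t.length = k := by
      have hle : k ≤ s.length := by
        by_contra hlt
        rw [not_le] at hlt
        have : N = 0 := Nat.div_eq_of_lt hlt
        omega
      simp [ht, hle]
    have hslen' : s.length = N * k := by rw [hslen, htlen]
    have hdvd : seq_len ∣ (s.length : Int) := by
      rw [hkcast]; exact ⟨(N : Int), by push_cast [hslen']; ring⟩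
    have hmod : ¬ PySem.Int.mod (s.length : Int) seq_len ≠ 0 := by
      simp [PySem.Int.mod_eq_zero_iff_dvd, hdvd]
    have hfd : PySem.Int.floordiv (s.length : Int) seq_len = (N : Int) := by
      rw [hkcast]
      calc PySem.Int.floordiv ((s.length : ℕ) : Int) ((k : ℕ) : Int)
          = ((s.length / k : ℕ) : Int) := PySem.Int.floordiv_natCast _ _
        _ = (N : Int) := by rw [hN]
    rw [if_neg hmod, if_neg hmod]
    simp only [hfd]
    -- B's side reduces to true
    have hslice : PySem.Chars.slice s none (some seq_len) = t := by
      rw [hkcast]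
      simp [PySem.List.slice_to, ht]
    rw [hslice, Int.toNat_natCast, ← hper']
    have hB : (decide (1 ≤ (N : Int)) && (s == s)) = true := by
      simp; omega
    rw [hB]
    -- A's side: every added segment equals t, so the set is {t} of length 1
    have hconst : ∀ x : Int, 0 ≤ x → x < (N : Int) →
        PySem.Chars.slice s (some (x * seq_len)) (some (x * seq_len + seq_len)) = t := by
      intro x hx0 hxN
      set j : ℕ := x.toNat with hj
      have hxj : x = (j : Int) := (Int.toNat_of_nonneg hx0).symm
      have hjN : j < N := by omega
      have h1 : x * seq_len = ((j * k : ℕ) : Int) := by rw [hxj, hkcast]; push_cast; ring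
      have h2 : x * seq_len + seq_len = ((j * k + k : ℕ) : Int) := by
        rw [hxj, hkcast]; push_cast; ring
      rw [h2, h1]
      simp only [PySem.Chars.slice_eq_listSlice]
      rw [PySem.List.slice_natCast]
      have h3 : j * k + k - (j * k) = k := by omega
      rw [h3]
      conv_lhs => rw [hper', ← htlen]
      exact periodic_drop_take t N j hjN
    have hrange : PySem.List.pyRange 0 (N : Int) 1 =
        0 :: PySem.List.pyRange 1 (N : Int) 1 :=
      PySem.List.pyRange_one_cons (by exact_mod_cast hNpos)
    have hfold : (PySem.List.pyRange 0 (N : Int) 1).foldl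
        (fun segments x =>
          PySem.Set.add segments
            (PySem.Chars.slice s (some (x * seq_len)) (some (x * seq_len + seq_len))))
        PySem.Set.empty = [t] := by
      rw [hrange]
      simp only [List.foldl_cons]
      have h0 : PySem.Set.add PySem.Set.empty
          (PySem.Chars.slice s (some (0 * seq_len)) (some (0 * seq_len + seq_len))) = [t] := by
        rw [hconst 0 le_rfl (by exact_mod_cast hNpos)]
        simp [PySem.Set.add, PySem.Set.empty]
      rw [h0]
      refine foldl_add_const _ t _ (fun x hx => ?_)
      rw [PySem.List.mem_pyRange_one] at hx
      exact hconst x (by omega) hx.2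
    simp only [hfold]
    simp [PySem.Set.len]
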